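-- pv_equiv track=rewrite | github.com/longhaiSK/bin | wrap_math_text.py | is_inside_text_command
-- ===== SOURCE A (Python) =====
-- TEXT_COMMANDS = {'text', 'mathrm', 'mathbf', 'textit', 'textbf', 'sf', 'it', 'rm', 'label', 'tag', 'mbox'}
--
-- def is_inside_text_command(full_string, current_index):
--     # Backward scan to see if we are enclosed in {} of a text command
--     balance = 0
--     i = current_index - 1
--     while i >= 0:
--         char = full_string[i]
--         if char == '}':
--             balance += 1
--         elif char == '{':
--             if balance > 0:
--                 balance -= 1
--             else:
--                 # Found the opening brace of our current scope
--                 cmd_end = i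
--                 cmd_start = i - 1
--                 # Skip backwards over spaces
--                 while cmd_start >= 0 and full_string[cmd_start].isspace():
--                     cmd_start -= 1
--                 # Scan backwards over letters to get command name
--                 while cmd_start >= 0 and full_string[cmd_start].isalpha():
--                     cmd_start -= 1
--
--                 # Check if the command found is in our ignore list (e.g., \text, \mathrm)
--                 command_name = full_string[cmd_start+1 : cmd_end].strip()
--                 return command_name in TEXT_COMMANDS
--         i -= 1
--     return False
-- ===== SOURCE B (Python) =====
-- TEXT_COMMANDS = {'text', 'mathrm', 'mathbf', 'textit', 'textbf', 'sf', 'it', 'rm', 'label', 'tag', 'mbox'}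
--
-- def _cmd_name(full_string, brace_index):
--     # Name of the command whose '{' sits at brace_index: skip spaces, then
--     # letters, backwards; take that segment and strip it.
--     k = brace_index - 1
--     while k >= 0 and full_string[k].isspace():
--         k -= 1
--     while k >= 0 and full_string[k].isalpha():
--         k -= 1
--     return full_string[k + 1:brace_index].strip()
--
-- def is_inside_text_command(full_string, current_index):
--     # Forward pass maintaining a stack of enclosing command names.
--     stack = []
--     for j in range(min(current_index, len(full_string))):
--         ch = full_string[j]
--         if ch == '{':
--             stack.append(_cmd_name(full_string, j))
--         elif ch == '}':
--             if stack:
--                 stack.pop()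
--     return bool(stack) and stack[-1] in TEXT_COMMANDS
-- ===== Notes on version B (the rewrite author's own statement) =====
-- stated objective: alternative
-- what changed: Replaces A's backward walk with a balance counter by a single forward pass over the prefix that maintains an explicit stack of enclosing command names and checks the top of the stack at the end.
-- crash fix: When current_index > len(full_string) A raises IndexError (it reads full_string[current_index-1]); B clamps the scan to the string and returns the result for the whole string. — e.g. on is_inside_text_command("ab", 3): A raises IndexError, B returns false
import Mathlib
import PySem

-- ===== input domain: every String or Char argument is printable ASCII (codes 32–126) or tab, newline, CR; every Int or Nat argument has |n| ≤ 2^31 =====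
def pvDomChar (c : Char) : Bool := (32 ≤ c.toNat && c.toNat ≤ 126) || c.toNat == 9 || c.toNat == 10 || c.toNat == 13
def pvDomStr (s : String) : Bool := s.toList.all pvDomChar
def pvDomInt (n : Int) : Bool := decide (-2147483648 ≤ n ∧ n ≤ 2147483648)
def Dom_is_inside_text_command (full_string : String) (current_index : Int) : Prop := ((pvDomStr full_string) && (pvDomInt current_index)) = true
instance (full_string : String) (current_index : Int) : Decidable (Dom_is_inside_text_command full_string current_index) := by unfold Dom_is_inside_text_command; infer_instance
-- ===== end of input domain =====

-- B replaces A's backward balance-counter scan by a forward pass keeping a stack of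
-- enclosing command names (objective: alternative decomposition, same cost).

-- ===== PORT A =====
def pvTextCommands : List String :=
  ["text", "mathrm", "mathbf", "textit", "textbf", "sf", "it", "rm", "label", "tag", "mbox"]

-- backward 'while cmd_start >= 0 and p(full_string[cmd_start]): cmd_start -= 1'
def pvSkipBack (p : Char → Bool) (cs : List Char) (j : Int) : Int :=
  if h : 0 ≤ j ∧ p (PySem.List.pyGetD cs j ' ') = true then pvSkipBack p cs (j - 1) else j
termination_by (j + 1).toNat
decreasing_by omega

-- command_name = full_string[cmd_start+1 : cmd_end].strip() after the two backward skips
def pvCmdName (cs : List Char) (cmdEnd : Int) : String :=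
  let s1 := pvSkipBack PySem.Chars.isspace cs (cmdEnd - 1)
  let s2 := pvSkipBack PySem.Chars.isalpha cs s1
  String.ofList (PySem.Chars.strip (PySem.List.slice cs (some (s2 + 1)) (some cmdEnd)))

-- A's main 'while i >= 0' loop (pyGet? = none is Python's IndexError, excluded by Pre_)
def pvALoop (cs : List Char) (i : Int) (balance : Nat) : Bool :=
  if _h : 0 ≤ i then
    match PySem.List.pyGet? cs i with
    | none => false
    | some c =>
      if c = '}' then pvALoop cs (i - 1) (balance + 1)
      else if c = '{' then
        if balance > 0 then pvALoop cs (i - 1) (balance - 1)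
        else pvTextCommands.contains (pvCmdName cs i)
      else pvALoop cs (i - 1) balance
  else false
termination_by (i + 1).toNat
decreasing_by all_goals omega

def is_inside_text_command (full_string : String) (current_index : Int) : Bool :=
  pvALoop full_string.toList (current_index - 1) 0

-- ===== PORT B =====
-- one forward step: push the command name on '{', pop (if any) on '}'
def pvBStep (cs : List Char) (stack : List String) (j : Nat) : List String :=
  let ch := cs.getD j ' '
  if ch = '{' then stack ++ [pvCmdName cs (j : Int)]
  else if ch = '}' then stack.dropLast
  else stack

def is_inside_text_command_alt (full_string : String) (current_index : Int) : Bool :=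
  let cs := full_string.toList
  let n := min current_index (cs.length : Int)
  let stack := (List.range n.toNat).foldl (pvBStep cs) []
  match stack.getLast? with
  | some name => pvTextCommands.contains name
  | none => false

-- ===== PRECONDITION & SPEC =====
-- Pre_ excludes exactly the inputs where A raises IndexError (reading full_string[i] past the end).
def Pre_is_inside_text_command (full_string : String) (current_index : Int) : Prop :=
  current_index ≤ (full_string.toList.length : Int)
instance (full_string : String) (current_index : Int) : Decidable (Pre_is_inside_text_command full_string current_index) := by unfold Pre_is_inside_text_command; infer_instance

def pvWitness_is_inside_text_command : String × Int := ("\\text{x", 7)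

-- When current_index > len(full_string), A raises IndexError; B clamps the scan and returns
-- the answer for the whole string.
def Raises_is_inside_text_command (full_string : String) (current_index : Int) : Prop :=
  (full_string.toList.length : Int) < current_index
instance (full_string : String) (current_index : Int) : Decidable (Raises_is_inside_text_command full_string current_index) := by unfold Raises_is_inside_text_command; infer_instance
def pvRaiseWitness_is_inside_text_command : String × Int := ("ab", 3)
def pvRaiseWitnessOut_is_inside_text_command : Bool := false

def Spec_is_inside_text_command (full_string : String) (current_index : Int) (out : Bool) : Prop := out = is_inside_text_command_alt full_string current_index
instance (full_string : String) (current_index : Int) (out : Bool) : Decidable (Spec_is_inside_text_command full_string current_index out) := by unfold Spec_is_inside_text_command; infer_instance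

-- ===== CLAIM (what is proved, stated in full; the proofs are below) =====
def Claim_equal_is_inside_text_command : Prop := ∀ (full_string : String) (current_index : Int), Dom_is_inside_text_command full_string current_index → Pre_is_inside_text_command full_string current_index → Spec_is_inside_text_command full_string current_index (is_inside_text_command full_string current_index)

def Claim_raises_is_inside_text_command : Prop := (∀ (full_string : String) (current_index : Int), Dom_is_inside_text_command full_string current_index → Raises_is_inside_text_command full_string current_index → ¬ Pre_is_inside_text_command full_string current_index) ∧ (Dom_is_inside_text_command (pvRaiseWitness_is_inside_text_command.1) (pvRaiseWitness_is_inside_text_command.2) ∧ Raises_is_inside_text_command (pvRaiseWitness_is_inside_text_command.1) (pvRaiseWitness_is_inside_text_command.2) ∧ is_inside_text_command_alt (pvRaiseWitness_is_inside_text_command.1) (pvRaiseWitness_is_inside_text_command.2) = pvRaiseWitnessOut_is_inside_text_command)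

-- ===== LEMMAS AND PROOFS =====

def pvStack (cs : List Char) (m : Nat) : List String :=
  (List.range m).foldl (pvBStep cs) []

def pvTop (l : List String) : Bool :=
  match l with
  | name :: _ => pvTextCommands.contains name
  | [] => false

theorem pvStack_succ (cs : List Char) (m : Nat) :
    pvStack cs (m + 1) = pvBStep cs (pvStack cs m) m := by
  simp [pvStack, List.range_succ]

theorem pvALoop_neg (cs : List Char) (i : Int) (b : Nat) (h : i < 0) :
    pvALoop cs i b = false := by
  rw [pvALoop]
  simp [show ¬ 0 ≤ i by omega]

theorem pvMain (cs : List Char) (m : Nat) (hm : m ≤ cs.length) (b : Nat) :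
    pvALoop cs ((m : Int) - 1) b = pvTop ((pvStack cs m).reverse.drop b) := by
  induction m generalizing b with
  | zero => simp [pvStack, pvTop, pvALoop_neg cs (-1) b (by omega)]
  | succ m ih =>
    have hm' : m < cs.length := by omega
    have hget : PySem.List.pyGet? cs ((m : Int) + 1 - 1) = some cs[m] := by
      have : ((m : Int) + 1 - 1) = (m : Int) := by omega
      rw [this, PySem.List.pyGet?_natCast]
      simp [hm']
    have hgetD : cs.getD m ' ' = cs[m] := List.getD_eq_getElem cs ' ' hm'
    rw [show ((m + 1 : Nat) : Int) - 1 = (m : Int) + 1 - 1 by push_cast; ring]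
    rw [pvALoop]
    simp only [show (0 : Int) ≤ (m : Int) + 1 - 1 by omega, dite_true, hget]
    rw [pvStack_succ]
    unfold pvBStep
    simp only [hgetD]
    by_cases hbr : cs[m] = '}'
    · simp only [hbr, reduceIte]
      rw [if_neg (show ¬('}' : Char) = '{' by decide)]
      have := ih (by omega) (b + 1)
      rw [show ((m : Int) + 1 - 1 - 1) = (m : Int) - 1 by omega, this]
      rw [← List.tail_reverse, List.drop_tail]
    · by_cases hbl : cs[m] = '{'
      · simp only [hbl, reduceIte]
        rw [if_neg (show ¬('{' : Char) = '}' by decide)]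
        by_cases hb : b > 0
        · simp only [hb, if_true]
          have := ih (by omega) (b - 1)
          rw [show ((m : Int) + 1 - 1 - 1) = (m : Int) - 1 by omega, this]
          rw [List.reverse_append]
          simp only [List.reverse_cons, List.reverse_nil, List.nil_append, List.singleton_append]
          rw [show b = (b - 1) + 1 by omega]
          simp [List.drop_succ_cons]
        · simp only [hb, if_false]
          have hb0 : b = 0 := by omega
          subst hb0
          rw [List.reverse_append]
          simp [pvTop]
      · rw [if_neg hbl, if_neg hbr, if_neg hbl, if_neg hbr]
        have := ih (by omega) b
        rw [show ((m : Int) + 1 - 1 - 1) = (m : Int) - 1 by omega, this]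

theorem pvTop_getLast (l : List String) :
    (match l.getLast? with
     | some name => pvTextCommands.contains name
     | none => false) = pvTop l.reverse := by
  rw [← List.head?_reverse]
  cases l.reverse with
  | nil => simp [pvTop]
  | cons a t => simp [pvTop]

-- ===== VERDICT (by name: the statement is the Claim_ definition above) =====
theorem is_inside_text_command_spec : Claim_equal_is_inside_text_command := by
  intro fs ci _ hpre
  unfold Spec_is_inside_text_command is_inside_text_command is_inside_text_command_alt
  unfold Pre_is_inside_text_command at hpre
  set cs := fs.toList with hcs
  simp only
  rw [pvTop_getLast]
  by_cases hci : ci ≤ 0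
  · have h1 : (min ci (cs.length : Int)).toNat = 0 := by omega
    rw [h1]
    rw [pvALoop_neg cs (ci - 1) 0 (by omega)]
    simp [pvTop]
  · have h1 : min ci (cs.length : Int) = ci := by omega
    have h2 : ((ci.toNat : Nat) : Int) - 1 = ci - 1 := by omega
    rw [h1, ← h2, pvMain cs ci.toNat (by omega) 0]
    simp [pvStack]

theorem is_inside_text_command_raises : Claim_raises_is_inside_text_command := by
  unfold Claim_raises_is_inside_text_command
  constructor
  · intro fs ci _ hr hp
    unfold Raises_is_inside_text_command at hr
    unfold Pre_is_inside_text_command at hp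
    omega
  · refine ⟨by decide, by decide, by decide⟩

-- self-check: B's port really returns the stated value at the raise witness
theorem pvRaisesWitness_ok :
    is_inside_text_command_alt pvRaiseWitness_is_inside_text_command.1
      pvRaiseWitness_is_inside_text_command.2 = pvRaiseWitnessOut_is_inside_text_command :=
  is_inside_text_command_raises.2.2.2
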